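-- pv_equiv track=rewrite | github.com/liliwwww/LargeFileConverter | csv_importer.py | normalize_ranges
-- ===== SOURCE A (Python) =====
-- def normalize_ranges(row_set: set) -> str:
--     """
--     将行号集合归一化为紧凑区间文本（排序、去重、合并相邻）。
--     {1,10,11,12,20} → '1,10-12,20'
--     """
--     if not row_set:
--         return ''
--     nums = sorted(row_set)
--     parts = []
--     start = prev = nums[0]
--     for n in nums[1:]:
--         if n == prev + 1:
--             prev = n
--         else:
--             parts.append(str(start) if start == prev else f'{start}-{prev}')
--             start = prev = n
--     parts.append(str(start) if start == prev else f'{start}-{prev}')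
--     return ','.join(parts)
-- ===== SOURCE B (Python) =====
-- def normalize_ranges(row_set: set) -> str:
--     """Staged passes instead of a state machine: one filter pass picks the
--     run starts (elements not preceded by their predecessor), an independent
--     filter pass picks the run ends (elements not followed by their
--     successor), and zipping the two lists pairs up each run for formatting."""
--     nums = sorted(row_set)
--     starts = [n for prev, n in zip([None] + nums, nums) if prev is None or n != prev + 1]
--     ends = [n for n, nxt in zip(nums, nums[1:] + [None]) if nxt is None or nxt != n + 1]
--     return ','.join(str(a) if a == b else f'{a}-{b}' for a, b in zip(starts, ends))
-- ===== Notes on version B (the rewrite author's own statement) =====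
-- stated objective: alternative
-- what changed: Replaces A's single-pass start/prev state machine (with its duplicated post-loop flush) by two independent boundary-filter passes over the sorted list - one selecting run starts (elements not preceded by their predecessor), one selecting run ends (elements not followed by their successor) - zipped together for formatting.
import Mathlib
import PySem

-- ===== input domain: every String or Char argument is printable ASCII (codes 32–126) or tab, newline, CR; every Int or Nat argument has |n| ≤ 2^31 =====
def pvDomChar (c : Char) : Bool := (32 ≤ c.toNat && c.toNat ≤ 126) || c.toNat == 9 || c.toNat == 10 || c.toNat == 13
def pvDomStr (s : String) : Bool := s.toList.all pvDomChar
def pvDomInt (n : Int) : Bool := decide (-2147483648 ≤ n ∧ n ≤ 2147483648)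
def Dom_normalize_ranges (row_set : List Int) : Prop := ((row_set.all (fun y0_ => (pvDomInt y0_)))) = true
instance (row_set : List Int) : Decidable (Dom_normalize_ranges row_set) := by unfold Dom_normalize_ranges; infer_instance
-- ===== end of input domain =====

-- B replaces A's start/prev state machine by two independent boundary-filter passes
-- (run starts = elements not preceded by their predecessor, run ends = elements not
-- followed by their successor) zipped for formatting; objective: alternative (same cost).

-- ===== PORT A =====
-- A's loop state: (parts, start, prev); the trailing append after the loop is the final flush.
def normalize_ranges (row_set : List Int) : String :=
  if row_set = [] then "" else
    match PySem.List.sorted row_set (fun x => x) false with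
    | [] => ""   -- unreachable: sorted of a nonempty list is nonempty
    | n0 :: tl =>
      let st := tl.foldl (fun (acc : List String × Int × Int) n =>
        if n = acc.2.2 + 1 then (acc.1, acc.2.1, n)
        else (acc.1 ++ [if acc.2.1 = acc.2.2 then PySem.Int.toStr acc.2.1
                        else PySem.Int.toStr acc.2.1 ++ "-" ++ PySem.Int.toStr acc.2.2], n, n))
        ([], n0, n0)
      PySem.Str.join "," (st.1 ++ [if st.2.1 = st.2.2 then PySem.Int.toStr st.2.1
                                   else PySem.Int.toStr st.2.1 ++ "-" ++ PySem.Int.toStr st.2.2])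

-- ===== PORT B =====
-- the `if` filters of Source B's two comprehensions
def pvKeepS (pn : Option Int × Int) : Option Int :=
  match pn with
  | (none, n) => some n
  | (some p, n) => if n ≠ p + 1 then some n else none

def pvKeepE (pn : Int × Option Int) : Option Int :=
  match pn with
  | (n, none) => some n
  | (n, some nxt) => if nxt ≠ n + 1 then some n else none

-- Source B's `[n for prev, n in zip([None] + nums, nums) if prev is None or n != prev + 1]`
def pvStarts (nums : List Int) : List Int :=
  (List.zip (none :: nums.map some) nums).filterMap pvKeepS

-- Source B's `[n for n, nxt in zip(nums, nums[1:] + [None]) if nxt is None or nxt != n + 1]`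
def pvEnds (nums : List Int) : List Int :=
  (List.zip nums ((PySem.List.slice nums (some 1) none).map some ++ [none])).filterMap pvKeepE

def normalize_ranges_alt (row_set : List Int) : String :=
  let nums := PySem.List.sorted row_set (fun x => x) false
  PySem.Str.join ","
    ((List.zip (pvStarts nums) (pvEnds nums)).map
      (fun ab => if ab.1 = ab.2 then PySem.Int.toStr ab.1
                 else PySem.Int.toStr ab.1 ++ "-" ++ PySem.Int.toStr ab.2))

-- ===== PRECONDITION & SPEC =====
def Spec_normalize_ranges (row_set : List Int) (out : String) : Prop := out = normalize_ranges_alt row_set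
instance (row_set : List Int) (out : String) : Decidable (Spec_normalize_ranges row_set out) := by unfold Spec_normalize_ranges; infer_instance

-- ===== CLAIM (what is proved, stated in full; the proofs are below) =====
def Claim_equal_normalize_ranges : Prop := ∀ (row_set : List Int), Dom_normalize_ranges row_set → Spec_normalize_ranges row_set (normalize_ranges row_set)

-- ===== LEMMAS AND PROOFS =====

-- the run list both programs denote: maximal consecutive runs of l continuing the run (s, p)
def pvRunsFrom (s p : Int) : List Int → List (Int × Int)
  | [] => [(s, p)]
  | n :: ns => if n = p + 1 then pvRunsFrom s n ns else (s, p) :: pvRunsFrom n n ns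

def pvFmtRun (r : Int × Int) : String :=
  if r.1 = r.2 then PySem.Int.toStr r.1 else PySem.Int.toStr r.1 ++ "-" ++ PySem.Int.toStr r.2

-- A's loop flushes exactly the formatted runs
theorem pvFoldlA_eq_runs (l : List Int) (parts : List String) (s p : Int) :
    (let st := l.foldl (fun (acc : List String × Int × Int) n =>
        if n = acc.2.2 + 1 then (acc.1, acc.2.1, n)
        else (acc.1 ++ [if acc.2.1 = acc.2.2 then PySem.Int.toStr acc.2.1
                        else PySem.Int.toStr acc.2.1 ++ "-" ++ PySem.Int.toStr acc.2.2], n, n))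
        (parts, s, p)
     st.1 ++ [if st.2.1 = st.2.2 then PySem.Int.toStr st.2.1
              else PySem.Int.toStr st.2.1 ++ "-" ++ PySem.Int.toStr st.2.2])
    = parts ++ (pvRunsFrom s p l).map pvFmtRun := by
  induction l generalizing parts s p with
  | nil => simp [pvRunsFrom, pvFmtRun]
  | cons n ns ih =>
    by_cases h : n = p + 1
    · simpa [pvRunsFrom, h] using ih parts s n
    · simpa [pvRunsFrom, h, pvFmtRun] using ih (parts ++ [if s = p then PySem.Int.toStr s
        else PySem.Int.toStr s ++ "-" ++ PySem.Int.toStr p]) n n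

-- recursive views of B's two filter passes
def pvAuxS (p : Int) : List Int → List Int
  | [] => []
  | y :: ys => (if y ≠ p + 1 then [y] else []) ++ pvAuxS y ys

def pvAuxE (p : Int) : List Int → List Int
  | [] => [p]
  | y :: ys => (if y ≠ p + 1 then [p] else []) ++ pvAuxE y ys

theorem pvZipAuxS (l : List Int) (p : Int) :
    (List.zip (some p :: l.map some) l).filterMap pvKeepS = pvAuxS p l := by
  induction l generalizing p with
  | nil => simp [pvAuxS]
  | cons y ys ih =>
    rw [List.map_cons, List.zip_cons_cons, List.filterMap_cons]
    by_cases h : y = p + 1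
    · have hk : pvKeepS (some p, y) = none := by simp [pvKeepS, h]
      have ha : pvAuxS p (y :: ys) = pvAuxS y ys := by simp [pvAuxS, h]
      rw [hk, ha]; exact ih y
    · have hk : pvKeepS (some p, y) = some y := by simp [pvKeepS, h]
      have ha : pvAuxS p (y :: ys) = y :: pvAuxS y ys := by simp [pvAuxS, h]
      rw [hk, ha]; exact congrArg (y :: ·) (ih y)

theorem pvStarts_cons (x : Int) (l : List Int) : pvStarts (x :: l) = x :: pvAuxS x l := by
  rw [pvStarts, List.map_cons, List.zip_cons_cons, List.filterMap_cons]
  rw [pvZipAuxS l x]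
  rfl

theorem pvEnds_cons (x : Int) (l : List Int) : pvEnds (x :: l) = pvAuxE x l := by
  rw [pvEnds, PySem.List.slice_from_one]
  show (List.zip (x :: l) (l.map some ++ [none])).filterMap pvKeepE = pvAuxE x l
  induction l generalizing x with
  | nil => simp [pvAuxE, pvKeepE]
  | cons y ys ih =>
    rw [List.map_cons]
    rw [show (some y :: List.map some ys) ++ [none] = some y :: (List.map some ys ++ [none]) from rfl]
    rw [List.zip_cons_cons, List.filterMap_cons]
    by_cases h : y = x + 1
    · have hk : pvKeepE (x, some y) = none := by simp [pvKeepE, h]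
      have ha : pvAuxE x (y :: ys) = pvAuxE y ys := by simp [pvAuxE, h]
      rw [hk, ha]; exact ih y
    · have hk : pvKeepE (x, some y) = some x := by simp [pvKeepE, h]
      have ha : pvAuxE x (y :: ys) = x :: pvAuxE y ys := by simp [pvAuxE, h]
      rw [hk, ha]; exact congrArg (x :: ·) (ih y)

-- the two passes compute exactly the starts and ends of the runs
theorem pvRuns_fst (l : List Int) (s p : Int) :
    (pvRunsFrom s p l).map Prod.fst = s :: pvAuxS p l := by
  induction l generalizing s p with
  | nil => simp [pvRunsFrom, pvAuxS]
  | cons y ys ih =>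
    by_cases h : y = p + 1 <;> simp [pvRunsFrom, pvAuxS, h, ih]

theorem pvRuns_snd (l : List Int) (s p : Int) :
    (pvRunsFrom s p l).map Prod.snd = pvAuxE p l := by
  induction l generalizing s p with
  | nil => simp [pvRunsFrom, pvAuxE]
  | cons y ys ih =>
    by_cases h : y = p + 1 <;> simp [pvRunsFrom, pvAuxE, h, ih]

theorem pvZipFstSnd (l : List (Int × Int)) :
    List.zip (l.map Prod.fst) (l.map Prod.snd) = l := by
  induction l with
  | nil => rfl
  | cons a t ih => simp [List.zip_cons_cons, ih]

-- ===== VERDICT (by name: the statement is the Claim_ definition above) =====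
theorem normalize_ranges_spec : Claim_equal_normalize_ranges := by
  intro row_set _
  show normalize_ranges row_set = normalize_ranges_alt row_set
  by_cases hrs : row_set = []
  · subst hrs; rfl
  · have hsn : PySem.List.sorted row_set (fun x => x) false ≠ [] := by
      simpa [PySem.List.sorted_eq_nil_iff] using hrs
    unfold normalize_ranges normalize_ranges_alt
    rw [if_neg hrs]
    cases hnum : PySem.List.sorted row_set (fun x => x) false with
    | nil => exact absurd hnum hsn
    | cons n0 tl =>
      have hzip : List.zip (pvStarts (n0 :: tl)) (pvEnds (n0 :: tl)) = pvRunsFrom n0 n0 tl := by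
        rw [pvStarts_cons, pvEnds_cons, ← pvRuns_fst tl n0 n0, ← pvRuns_snd tl n0 n0]
        exact pvZipFstSnd _
      simp only [hzip]
      have hfmt : (fun ab : Int × Int => if ab.1 = ab.2 then PySem.Int.toStr ab.1
                   else PySem.Int.toStr ab.1 ++ "-" ++ PySem.Int.toStr ab.2) = pvFmtRun := by
        funext ab; rfl
      rw [hfmt]
      exact congrArg (PySem.Str.join ",") (pvFoldlA_eq_runs tl [] n0 n0)
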